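-- pv_equiv track=rewrite | github.com/Turidus/Minecraft-MapMaker | Parsers.py | mapIDToAmountString
-- ===== SOURCE A (Python) =====
-- def _sortkeyForUsedBlocks(string):
--
--     if "_" not in string:
--         return (int(string), -1)
--     else:
--         splitString = string.split("_")
--         return (int(splitString[0]),int(splitString[1]))
--
-- def mapIDToAmountString(mapIDMatrix,mapIDDic):
--
--     usedBlocks = {}
--
--     for x in range(len(mapIDMatrix)):
--
--
--
--         for z in range(len(mapIDMatrix[x])):
--
--             block = mapIDDic[mapIDMatrix[x][z]]
--
--             if block[2] not in usedBlocks: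
--
--                 usedBlocks[block[2]] = [1,block[1]]
--
--             else:
--                 usedBlocks[block[2]][0] += 1
--
--     retString = "You need follwing amount of blocks\n"
--     retString += "{:^40}{:^10}{:^10}\n".format("Blockname","BlockID","Amount")
--
--     usedBlockKeys = list(usedBlocks.keys())
--     usedBlockKeys.sort(key = _sortkeyForUsedBlocks)
--
--     for key in usedBlockKeys:
--
--         if "_" in key:
--             blockID =  key.replace("_",":")
--
--         else:
--             blockID =  key
--
--         retString += "{:^40}{:^10}{:>10}\n".format(usedBlocks[key][1], blockID, str(usedBlocks[key][0]))
--
--     return retString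
-- ===== SOURCE B (Python) =====
-- def _sortkeyForUsedBlocks(string):
--
--     if "_" not in string:
--         return (int(string), -1)
--     else:
--         splitString = string.split("_")
--         return (int(splitString[0]),int(splitString[1]))
--
-- def mapIDToAmountString(mapIDMatrix, mapIDDic):
--     # Sort the flattened block records once, then repeatedly peel off the front
--     # key's whole group (filter), emitting one line per group.
--     records = [mapIDDic[c] for row in mapIDMatrix for c in row]
--     records.sort(key=lambda b: _sortkeyForUsedBlocks(b[2]))
--     out = "You need follwing amount of blocks\n"
--     out += "{:^40}{:^10}{:^10}\n".format("Blockname", "BlockID", "Amount")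
--     while records:
--         key = records[0][2]
--         run = [b for b in records if b[2] == key]
--         records = [b for b in records if b[2] != key]
--         out += "{:^40}{:^10}{:>10}\n".format(run[0][1], key.replace("_", ":"), str(len(run)))
--     return out
-- ===== Notes on version B (the rewrite author's own statement) =====
-- stated objective: alternative
-- what changed: Replaces A's incremental dict aggregation (per-cell insert-or-increment, then sorting the distinct keys) by flatten-to-record-list, one stable sort of all records by the numeric sort key, then a peel loop that repeatedly splits off the whole group of the leading key with two filters and emits one line per group.
import Mathlib
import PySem

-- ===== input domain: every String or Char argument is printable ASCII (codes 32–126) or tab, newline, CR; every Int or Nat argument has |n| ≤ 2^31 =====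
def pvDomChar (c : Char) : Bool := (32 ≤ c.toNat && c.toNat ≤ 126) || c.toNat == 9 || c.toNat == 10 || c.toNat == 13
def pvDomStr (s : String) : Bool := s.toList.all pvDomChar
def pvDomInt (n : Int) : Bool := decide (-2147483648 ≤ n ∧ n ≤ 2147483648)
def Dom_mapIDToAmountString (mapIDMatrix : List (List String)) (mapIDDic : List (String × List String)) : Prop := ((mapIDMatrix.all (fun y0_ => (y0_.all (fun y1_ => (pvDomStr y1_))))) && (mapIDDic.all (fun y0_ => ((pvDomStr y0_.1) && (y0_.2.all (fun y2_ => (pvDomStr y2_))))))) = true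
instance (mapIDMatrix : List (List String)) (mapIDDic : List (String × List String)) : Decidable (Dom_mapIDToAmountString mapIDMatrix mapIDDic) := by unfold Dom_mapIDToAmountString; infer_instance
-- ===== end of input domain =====

-- B replaces A's incremental dict counting (insert-or-increment per cell, then sorting the distinct
-- keys) by: flatten to one record list, stable-sort it once by the numeric sort key, then repeatedly
-- peel off the whole group of the leading key with two filters, emitting one line per group
-- (objective: alternative; equal return values, no speed claim).

-- Shared helpers: the Python dict argument as a Python dict (later duplicate keys overwrite),
-- the module helper _sortkeyForUsedBlocks, and str.format's '^'/'>' padding (space fill),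
-- ported by hand (exact for these format specs).
def pvDictOf (l : List (String × List String)) : PySem.Dict String (List String) :=
  l.foldl (fun d p => d.insert p.1 p.2) PySem.Dict.empty

def sortkeyForUsedBlocks (s : String) : Int × Int :=
  if PySem.Str.isIn "_" s = false then
    ((PySem.Int.ofStr? s).getD 0, -1)
  else
    let splitString := (PySem.Str.split? s "_").getD []
    ((PySem.Int.ofStr? (PySem.List.pyGetD splitString 0 "")).getD 0,
     (PySem.Int.ofStr? (PySem.List.pyGetD splitString 1 "")).getD 0)

-- Python's tuple comparison on a pair of ints is the lexicographic order on Int ×ₗ Int;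
-- both ports sort with this key (exact for the 2-tuples _sortkeyForUsedBlocks returns).
def pvSkey (s : String) : Int ×ₗ Int := toLex (sortkeyForUsedBlocks s)

def pyCenter (s : String) (w : Nat) : String :=
  let n := s.toList.length
  if w ≤ n then s
  else String.ofList (List.replicate ((w - n) / 2) ' ') ++ s ++ String.ofList (List.replicate ((w - n) - (w - n) / 2) ' ')

def pyRight (s : String) (w : Nat) : String :=
  String.ofList (List.replicate (w - s.toList.length) ' ') ++ s

-- ===== PORT A =====
def mapIDToAmountString (mapIDMatrix : List (List String)) (mapIDDic : List (String × List String)) : String :=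
  let dic := pvDictOf mapIDDic
  let usedBlocks : PySem.Dict String (Int × String) :=
    (PySem.List.pyRange 0 (PySem.List.len mapIDMatrix)).foldl (fun ub x =>
      (PySem.List.pyRange 0 (PySem.List.len (PySem.List.pyGetD mapIDMatrix x []))).foldl (fun ub z =>
        let block := (dic.get? (PySem.List.pyGetD (PySem.List.pyGetD mapIDMatrix x []) z "")).getD []
        if ub.contains (PySem.List.pyGetD block 2 "") = false then
          ub.insert (PySem.List.pyGetD block 2 "") (1, PySem.List.pyGetD block 1 "")
        else
          ub.modify (PySem.List.pyGetD block 2 "") (0, "") (fun v => (v.1 + 1, v.2))) ub)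
      PySem.Dict.empty
  let retString := "You need follwing amount of blocks\n"
  let retString := retString ++ (pyCenter "Blockname" 40 ++ pyCenter "BlockID" 10 ++ pyCenter "Amount" 10 ++ "\n")
  let usedBlockKeys := PySem.List.sorted usedBlocks.keys pvSkey
  usedBlockKeys.foldl (fun retString key =>
    let blockID := if PySem.Str.isIn "_" key then PySem.Str.replace key "_" ":" else key
    let v := usedBlocks.getD key (0, "")
    retString ++ (pyCenter v.2 40 ++ pyCenter blockID 10 ++ pyRight (PySem.Int.toStr v.1) 10 ++ "\n")) retString

-- ===== PORT B =====
-- the 'while records:' loop of Source B: peel off the leading key's whole group, append its line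
def pvPeel : List (List String) → String → String
  | [], out => out
  | b :: t, out =>
    let key := PySem.List.pyGetD b 2 ""
    let run := (b :: t).filter (fun r => PySem.List.pyGetD r 2 "" == key)
    let rest := (b :: t).filter (fun r => !(PySem.List.pyGetD r 2 "" == key))
    pvPeel rest (out ++ (pyCenter (PySem.List.pyGetD (PySem.List.pyGetD run 0 []) 1 "") 40 ++
      pyCenter (PySem.Str.replace key "_" ":") 10 ++
      pyRight (PySem.Int.toStr (PySem.List.len run)) 10 ++ "\n"))
termination_by l _ => l.length
decreasing_by
  simp only [List.filter_cons, BEq.rfl, Bool.not_true, Bool.false_eq_true, if_false,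
    List.length_cons]
  exact Nat.lt_succ_of_le (List.length_filter_le _ _)

def mapIDToAmountString_alt (mapIDMatrix : List (List String)) (mapIDDic : List (String × List String)) : String :=
  let dic := pvDictOf mapIDDic
  let records := mapIDMatrix.flatMap (fun row => row.map (fun c => (dic.get? c).getD []))
  let records2 := PySem.List.sorted records (fun b => pvSkey (PySem.List.pyGetD b 2 ""))
  let out := "You need follwing amount of blocks\n"
  let out := out ++ (pyCenter "Blockname" 40 ++ pyCenter "BlockID" 10 ++ pyCenter "Amount" 10 ++ "\n")
  pvPeel records2 out

-- ===== PRECONDITION & SPEC =====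
def pvBlockOf (dic : PySem.Dict String (List String)) (c : String) : List String :=
  (dic.get? c).getD []

def pvKeyOf (dic : PySem.Dict String (List String)) (c : String) : String :=
  PySem.List.pyGetD (pvBlockOf dic c) 2 ""

def pvParseOK (s : String) : Bool :=
  if PySem.Str.isIn "_" s then
    (PySem.Int.ofStr? (PySem.List.pyGetD ((PySem.Str.split? s "_").getD []) 0 "")).isSome &&
    (PySem.Int.ofStr? (PySem.List.pyGetD ((PySem.Str.split? s "_").getD []) 1 "")).isSome
  else (PySem.Int.ofStr? s).isSome

def pvCellOK (dic : PySem.Dict String (List String)) (c : String) : Bool :=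
  (dic.get? c).isSome && decide (3 ≤ ((dic.get? c).getD []).length) && pvParseOK (pvKeyOf dic c)

-- Pre_ excludes exactly the inputs on which A raises: a matrix cell missing from mapIDDic
-- (KeyError), a block record shorter than 3 entries (IndexError), or a block ID that
-- _sortkeyForUsedBlocks cannot parse as int(s) (ValueError).
def Pre_mapIDToAmountString (mapIDMatrix : List (List String)) (mapIDDic : List (String × List String)) : Prop :=
  ((mapIDMatrix.flatMap (fun r => r)).all (fun c => pvCellOK (pvDictOf mapIDDic) c)) = true
instance (mapIDMatrix : List (List String)) (mapIDDic : List (String × List String)) : Decidable (Pre_mapIDToAmountString mapIDMatrix mapIDDic) := by unfold Pre_mapIDToAmountString; infer_instance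

def pvWitness_mapIDToAmountString : List (List String) × (List (String × List String)) :=
  ([["s", "d", "s"], ["g"]],
   [("s", ["x", "Stone", "1"]), ("d", ["y", "Dirt", "3_2"]), ("g", ["z", "Grass", "2"])])

def Spec_mapIDToAmountString (mapIDMatrix : List (List String)) (mapIDDic : List (String × List String)) (out : String) : Prop := out = mapIDToAmountString_alt mapIDMatrix mapIDDic
instance (mapIDMatrix : List (List String)) (mapIDDic : List (String × List String)) (out : String) : Decidable (Spec_mapIDToAmountString mapIDMatrix mapIDDic out) := by unfold Spec_mapIDToAmountString; infer_instance

-- ===== CLAIM (what is proved, stated in full; the proofs are below) =====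
def Claim_equal_mapIDToAmountString : Prop := ∀ (mapIDMatrix : List (List String)) (mapIDDic : List (String × List String)), Dom_mapIDToAmountString mapIDMatrix mapIDDic → Pre_mapIDToAmountString mapIDMatrix mapIDDic → Spec_mapIDToAmountString mapIDMatrix mapIDDic (mapIDToAmountString mapIDMatrix mapIDDic)

-- ===== LEMMAS AND PROOFS =====
-- ---- A-side characterisation: the dict loop counts per key and keeps the first-seen name ----
def pvNameOf (dic : PySem.Dict String (List String)) (c : String) : String :=
  PySem.List.pyGetD (pvBlockOf dic c) 1 ""

def pvStepA (dic : PySem.Dict String (List String)) (d : PySem.Dict String (Int × String)) (c : String) :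
    PySem.Dict String (Int × String) :=
  if d.contains (pvKeyOf dic c) = false then d.insert (pvKeyOf dic c) (1, pvNameOf dic c)
  else d.modify (pvKeyOf dic c) (0, "") (fun v => (v.1 + 1, v.2))

def pvAgg (dic : PySem.Dict String (List String)) (l : List String) (k : String) : Int × String :=
  match l.find? (fun c => pvKeyOf dic c == k) with
  | some c0 => (((l.map (pvKeyOf dic)).count k : Int), pvNameOf dic c0)
  | none => (0, "")

theorem foldA_getD (dic : PySem.Dict String (List String)) :
    ∀ (l : List String) (d : PySem.Dict String (Int × String)) (k : String),
      (l.foldl (pvStepA dic) d).getD k (0, "") =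
        if d.contains k = true then
          ((d.getD k (0, "")).1 + ((l.map (pvKeyOf dic)).count k : Int), (d.getD k (0, "")).2)
        else pvAgg dic l k := by
  intro l
  induction l with
  | nil =>
    intro d k
    by_cases h : d.contains k = true
    · simp [h]
    · simp [h, pvAgg, PySem.Dict.getD_eq_get?_getD]
      rw [PySem.Dict.contains_eq_isSome_get?] at h
      cases hg : d.get? k with
      | none => rfl
      | some v => simp [hg] at h
  | cons c t ih =>
    intro d k
    by_cases hk : pvKeyOf dic c = k
    · subst hk
      by_cases hd : d.contains (pvKeyOf dic c) = true
      · have hstep : pvStepA dic d c = d.modify (pvKeyOf dic c) (0, "") (fun v => (v.1 + 1, v.2)) := by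
          simp [pvStepA, hd]
        simp only [List.foldl_cons, hstep, ih]
        have hc : (d.modify (pvKeyOf dic c) (0,"") (fun v => (v.1 + 1, v.2))).contains (pvKeyOf dic c) = true := by
          simp [PySem.Dict.contains_modify]
        simp only [hc, if_pos, hd]
        rw [PySem.Dict.getD_modify_self]
        simp
        omega
      · have hstep : pvStepA dic d c = d.insert (pvKeyOf dic c) (1, pvNameOf dic c) := by
          simp [pvStepA, hd]
        simp only [List.foldl_cons, hstep, ih]
        have hc : (d.insert (pvKeyOf dic c) (1, pvNameOf dic c)).contains (pvKeyOf dic c) = true := by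
          simp
        simp only [hc, if_pos, hd]
        rw [PySem.Dict.getD_insert]
        simp [pvAgg]
        omega
    · have hgoal : (pvStepA dic d c).contains k = d.contains k ∧
          (pvStepA dic d c).getD k (0,"") = d.getD k (0,"") := by
        constructor
        · by_cases hd : d.contains (pvKeyOf dic c) = true <;>
            simp [pvStepA, hd, PySem.Dict.contains_modify, PySem.Dict.contains_insert, Ne.symm hk]
        · by_cases hd : d.contains (pvKeyOf dic c) = true <;>
            simp [pvStepA, hd]
          · exact PySem.Dict.getD_modify_of_ne d (0,"") _ (fun h => hk h.symm)
          · rw [PySem.Dict.getD_insert]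
            simp only [ite_eq_right_iff]
            intro h; exact absurd h.symm hk
      simp only [List.foldl_cons, ih, hgoal.1, hgoal.2]
      by_cases h : d.contains k = true
      · simp [h, hk]
      · simp [h, pvAgg, hk]

theorem keys_insert_single (d : PySem.Dict String (Int × String)) (k : String) (v : Int × String) :
    (d.insert k v).keys = PySem.Set.update d.keys [k] := by
  have h := PySem.Dict.keys_foldl_insert [k] (fun _ _ => v) d
  simpa using h

theorem stepA_keys (dic : PySem.Dict String (List String)) (d : PySem.Dict String (Int × String)) (c : String) :
    (pvStepA dic d c).keys = PySem.Set.add d.keys (pvKeyOf dic c) := by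
  by_cases hd : d.contains (pvKeyOf dic c) = true
  · have h1 : pvStepA dic d c = d.modify (pvKeyOf dic c) (0, "") (fun v => (v.1 + 1, v.2)) := by
      simp [pvStepA, hd]
    rw [h1, PySem.Dict.keys_modify, keys_insert_single]
    rfl
  · have h1 : pvStepA dic d c = d.insert (pvKeyOf dic c) (1, pvNameOf dic c) := by
      simp [pvStepA, hd]
    rw [h1, keys_insert_single]
    rfl

theorem foldA_keys (dic : PySem.Dict String (List String)) :
    ∀ (l : List String) (d : PySem.Dict String (Int × String)),
      (l.foldl (pvStepA dic) d).keys = PySem.Set.update d.keys (l.map (pvKeyOf dic)) := by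
  intro l
  induction l with
  | nil => intro d; simp [PySem.Set.update]
  | cons c t ih =>
    intro d
    simp only [List.foldl_cons, ih, stepA_keys, List.map_cons]
    rfl

theorem loopA_eq (dic : PySem.Dict String (List String)) (m : List (List String)) :
    (PySem.List.pyRange 0 (PySem.List.len m)).foldl (fun ub x =>
      (PySem.List.pyRange 0 (PySem.List.len (PySem.List.pyGetD m x []))).foldl (fun ub z =>
        let block := (dic.get? (PySem.List.pyGetD (PySem.List.pyGetD m x []) z "")).getD []
        if ub.contains (PySem.List.pyGetD block 2 "") = false then
          ub.insert (PySem.List.pyGetD block 2 "") (1, PySem.List.pyGetD block 1 "")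
        else
          ub.modify (PySem.List.pyGetD block 2 "") (0, "") (fun v => (v.1 + 1, v.2))) ub)
      PySem.Dict.empty
    = (m.flatMap (fun r => r)).foldl (pvStepA dic) PySem.Dict.empty := by
  have inner : ∀ (row : List String) (acc : PySem.Dict String (Int × String)),
      (PySem.List.pyRange 0 (PySem.List.len row)).foldl (fun ub z =>
        let block := (dic.get? (PySem.List.pyGetD row z "")).getD []
        if ub.contains (PySem.List.pyGetD block 2 "") = false then
          ub.insert (PySem.List.pyGetD block 2 "") (1, PySem.List.pyGetD block 1 "")
        else
          ub.modify (PySem.List.pyGetD block 2 "") (0, "") (fun v => (v.1 + 1, v.2))) acc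
      = row.foldl (pvStepA dic) acc := by
    intro row acc
    exact PySem.List.foldl_pyRange_pyGetD row "" (pvStepA dic) acc (a := 0) le_rfl
  simp only [inner]
  have outer := PySem.List.foldl_pyRange_pyGetD m [] (fun acc row => row.foldl (pvStepA dic) acc)
      PySem.Dict.empty (a := 0) le_rfl
  rw [outer]
  rw [List.foldl_flatMap]
  simp

theorem join_empty_cons (a : String) (l : List String) :
    PySem.Str.join "" (a :: l) = a ++ PySem.Str.join "" l := by
  cases l with
  | nil => simp [PySem.Str.join, PySem.Chars.join_singleton, PySem.Chars.join_nil]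
  | cons b r =>
    simp [PySem.Str.join, PySem.Chars.join_cons_cons]

theorem strfold {α : Type} (g : α → String) :
    ∀ (l : List α) (init : String),
      l.foldl (fun r x => r ++ g x) init = init ++ PySem.Str.join "" (l.map g) := by
  intro l
  induction l with
  | nil =>
    intro init
    simp [PySem.Str.join, PySem.Chars.join_nil]
  | cons c t ih =>
    intro init
    rw [List.foldl_cons, ih, List.map_cons, join_empty_cons, String.append_assoc]

-- ---- stability of the insertion sort: a stable sort is the concatenation, over the sorted
-- distinct key values, of the equal-key elements in their original order ----

theorem ins_front {α : Type} (before : α → α → Bool) (x : α) :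
    ∀ (L : List α), (∀ y ∈ L, before x y = true) → PySem.List.insertBy before x L = x :: L := by
  intro L h
  cases L with
  | nil => rfl
  | cons y ys => simp [PySem.List.insertBy, h y (by simp)]

theorem ins_skip {α : Type} (before : α → α → Bool) (x : α) :
    ∀ (ys zs : List α), (∀ y ∈ ys, before x y = false) →
      PySem.List.insertBy before x (ys ++ zs) = ys ++ PySem.List.insertBy before x zs := by
  intro ys
  induction ys with
  | nil => intro zs h; simp
  | cons y t ih =>
    intro zs h
    simp only [List.cons_append, PySem.List.insertBy, h y (by simp), Bool.false_eq_true, if_false]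
    rw [ih zs (fun a ha => h a (by simp [ha]))]

theorem ins_blocks {α κ : Type} [LinearOrder κ] (f : α → κ) (x : α) :
    ∀ (vs : List κ) (g : κ → List α), vs.Pairwise (· < ·) →
      (∀ v ∈ vs, ∀ y ∈ g v, f y = v) →
      PySem.List.insertBy (fun a b => decide (f a < f b)) x (vs.flatMap g) =
        (vs.filter (fun v => decide (v ≤ f x))).flatMap g ++
          x :: (vs.filter (fun v => decide (f x < v))).flatMap g := by
  intro vs
  induction vs with
  | nil => intro g _ _; rfl
  | cons v t ih =>
    intro g hp hg
    rcases List.pairwise_cons.mp hp with ⟨hv, ht⟩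
    by_cases hvx : v ≤ f x
    · rw [List.flatMap_cons,
        ins_skip _ _ _ _ (fun y hy => by
          simp only [decide_eq_false_iff_not, not_lt]
          rw [hg v (by simp) y hy]; exact hvx),
        ih g ht (fun w hw y hy => hg w (by simp [hw]) y hy),
        List.filter_cons_of_pos (by simp [hvx]),
        List.filter_cons_of_neg (by simp [not_lt.mpr hvx]), List.flatMap_cons, List.append_assoc]
    · rw [not_le] at hvx
      have hall : ∀ y ∈ (v :: t).flatMap g, (fun a b => decide (f a < f b)) x y = true := by
        intro y hy
        rcases List.mem_flatMap.mp hy with ⟨w, hw, hyw⟩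
        have : f y = w := hg w hw y hyw
        rcases List.mem_cons.mp hw with h | h
        · subst h; simp [this, hvx]
        · have : v < w := hv w h
          simp only [decide_eq_true_eq]
          rw [hg w hw y hyw]
          exact hvx.trans this
      rw [ins_front _ _ _ hall,
        List.filter_cons_of_neg (by simp [not_le.mpr hvx]),
        List.filter_cons_of_pos (by simp [hvx])]
      have h0 : List.filter (fun w => decide (w ≤ f x)) t = [] :=
        List.filter_eq_nil_iff.mpr (fun y hy => by simp [not_le.mpr (hvx.trans (hv y hy))])
      have h1 : List.filter (fun w => decide (f x < w)) t = t :=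
        List.filter_eq_self.mpr (fun y hy => by simp [hvx.trans (hv y hy)])
      rw [h0, h1]
      rfl

theorem split_le {κ : Type} [LinearOrder κ] (c : κ) :
    ∀ (vs : List κ), vs.Pairwise (· < ·) →
      vs = vs.filter (fun v => decide (v ≤ c)) ++ vs.filter (fun v => decide (c < v)) := by
  intro vs
  induction vs with
  | nil => intro _; rfl
  | cons v t ih =>
    intro hp
    rcases List.pairwise_cons.mp hp with ⟨hv, ht⟩
    by_cases hc : v ≤ c
    · rw [List.filter_cons_of_pos (by simp [hc]), List.filter_cons_of_neg (by simp [not_lt.mpr hc])]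
      rw [List.cons_append, ← ih ht]
    · rw [not_le] at hc
      have hall : ∀ y ∈ t, c < y := fun y hy => hc.trans (hv y hy)
      rw [List.filter_cons_of_neg (by simp [not_le.mpr hc]), List.filter_cons_of_pos (by simp [hc])]
      rw [List.filter_eq_nil_iff.mpr (fun y hy => by simp [not_le.mpr (hall y hy)]), List.nil_append]
      rw [List.filter_eq_self.mpr (fun y hy => by simp [hall y hy])]

theorem last_le {κ : Type} [LinearOrder κ] (c : κ) :
    ∀ (vs : List κ), vs.Pairwise (· < ·) → c ∈ vs →
      vs.filter (fun v => decide (v ≤ c)) = vs.filter (fun v => decide (v < c)) ++ [c] := by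
  intro vs
  induction vs with
  | nil => intro _ h; simp at h
  | cons v t ih =>
    intro hp hm
    rcases List.pairwise_cons.mp hp with ⟨hv, ht⟩
    rcases List.mem_cons.mp hm with h | h
    · subst h
      rw [List.filter_cons_of_pos (by simp), List.filter_cons_of_neg (by simp)]
      have h1 : List.filter (fun y => decide (y ≤ c)) t = [] :=
        List.filter_eq_nil_iff.mpr (fun y hy => by simp [not_le.mpr (hv y hy)])
      have h2 : List.filter (fun y => decide (y < c)) t = [] :=
        List.filter_eq_nil_iff.mpr (fun y hy => by simp [not_lt.mpr (le_of_lt (hv y hy))])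
      simp [h1, h2]
    · have hvc : v < c := hv c h
      rw [List.filter_cons_of_pos (by simp [le_of_lt hvc]), List.filter_cons_of_pos (by simp [hvc])]
      rw [ih ht h]
      rfl

theorem flatMap_congr_mem {α κ : Type} (F : List κ) (B B' : κ → List α)
    (h : ∀ v ∈ F, B' v = B v) : F.flatMap B' = F.flatMap B := by
  induction F with
  | nil => rfl
  | cons v t ih =>
    rw [List.flatMap_cons, List.flatMap_cons, h v (by simp), ih (fun w hw => h w (by simp [hw]))]

theorem sorted_blocks {α κ : Type} [LinearOrder κ] [BEq κ] [LawfulBEq κ] (f : α → κ) :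
    ∀ (l : List α),
      PySem.List.sorted l f =
        (PySem.List.sorted (PySem.Set.ofList (l.map f)) (fun v => v)).flatMap
          (fun v => l.filter (fun x => decide (f x = v))) := by
  intro l
  induction l using List.reverseRecOn with
  | nil => rfl
  | append_singleton l x ih =>
    have hstep : PySem.List.sorted (l ++ [x]) f =
        PySem.List.insertBy (fun a b => decide (f a < f b)) x (PySem.List.sorted l f) := by
      rw [PySem.List.sorted_eq_foldl_insertBy, PySem.List.sorted_eq_foldl_insertBy,
        List.foldl_append, List.foldl_cons, List.foldl_nil]
    set vs := PySem.List.sorted (PySem.Set.ofList (l.map f)) (fun v => v) with hvs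
    set B : κ → List α := fun v => l.filter (fun y => decide (f y = v)) with hB
    have hvs_pair : vs.Pairwise (· < ·) := PySem.List.sorted_ofList_pairwise_lt _
    have hg : ∀ v ∈ vs, ∀ y ∈ B v, f y = v := by
      intro v _ y hy
      exact of_decide_eq_true (List.mem_filter.mp hy).2
    have hB' : ∀ v, (l ++ [x]).filter (fun y => decide (f y = v)) =
        B v ++ (if decide (f x = v) = true then [x] else []) := by
      intro v
      rw [List.filter_append]
      congr 1
      simp [List.filter_singleton]
    have hmemvs : ∀ v, v ∈ vs ↔ v ∈ l.map f := by
      intro v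
      rw [hvs, PySem.List.mem_sorted, PySem.Set.mem_ofList]
    rw [hstep, ih, ins_blocks f x vs B hvs_pair hg]
    rw [List.map_append, List.map_cons, List.map_nil, PySem.Set.ofList_append_singleton]
    by_cases hm : f x ∈ l.map f
    · have hadd : (PySem.Set.ofList (l.map f)).add (f x) = PySem.Set.ofList (l.map f) :=
        PySem.Set.add_of_mem (by rw [PySem.Set.mem_ofList]; exact hm)
      rw [hadd, ← hvs]
      have hfx : f x ∈ vs := (hmemvs _).mpr hm
      conv_rhs => rw [split_le (f x) vs hvs_pair]
      rw [last_le (f x) vs hvs_pair hfx]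
      have e1 : ∀ (F : List κ), (∀ v ∈ F, v ≠ f x) →
          F.flatMap (fun v => (l ++ [x]).filter (fun y => decide (f y = v))) = F.flatMap B := by
        intro F hF
        apply flatMap_congr_mem
        intro v hv
        rw [hB', if_neg (by simp [Ne.symm (hF v hv)])]
        simp
      rw [List.flatMap_append, List.flatMap_append, List.flatMap_append]
      rw [e1 (vs.filter (fun v => decide (v < f x)))
            (fun v hv => ne_of_lt (by simpa using (List.mem_filter.mp hv).2)),
          e1 (vs.filter (fun v => decide (f x < v)))
            (fun v hv => ne_of_gt (by simpa using (List.mem_filter.mp hv).2))]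
      have e3 : List.flatMap (fun v => (l ++ [x]).filter (fun y => decide (f y = v))) [f x] =
          B (f x) ++ [x] := by
        rw [List.flatMap_cons, List.flatMap_nil, hB', if_pos (by simp), List.append_nil]
      rw [e3]
      simp
    · have hadd : (PySem.Set.ofList (l.map f)).add (f x) = PySem.Set.ofList (l.map f) ++ [f x] :=
        PySem.Set.add_of_not_mem (by rw [PySem.Set.mem_ofList]; exact hm)
      have hfx : f x ∉ vs := fun h => hm ((hmemvs _).mp h)
      have hys : PySem.List.sorted (PySem.Set.ofList (l.map f) ++ [f x]) (fun v => v) =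
          vs.filter (fun v => decide (v ≤ f x)) ++ f x :: vs.filter (fun v => decide (f x < v)) := by
        apply PySem.List.sorted_eq_of_perm_of_pairwise_lt
        · have p1 : (vs.filter (fun v => decide (v ≤ f x)) ++
              f x :: vs.filter (fun v => decide (f x < v))).Perm
              (f x :: (vs.filter (fun v => decide (v ≤ f x)) ++ vs.filter (fun v => decide (f x < v)))) :=
            List.perm_middle
          rw [← split_le (f x) vs hvs_pair] at p1
          exact p1.trans (((PySem.List.sorted_perm _ _ _).cons (f x)).trans
            (List.perm_append_singleton _ _).symm)
        · apply List.pairwise_append.mpr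
          refine ⟨hvs_pair.sublist List.filter_sublist, ?_, ?_⟩
          · apply List.pairwise_cons.mpr
            refine ⟨?_, hvs_pair.sublist List.filter_sublist⟩
            intro b hb
            simpa using (List.mem_filter.mp hb).2
          · intro a ha b hb
            have ha1 : a ∈ vs := (List.mem_filter.mp ha).1
            have ha2 : a ≤ f x := by simpa using (List.mem_filter.mp ha).2
            have halt : a < f x := lt_of_le_of_ne ha2 (fun h => hfx (h ▸ ha1))
            rcases List.mem_cons.mp hb with h | h
            · rw [h]; exact halt
            · have : f x < b := by simpa using (List.mem_filter.mp h).2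
              exact halt.trans this
      rw [hadd, hys]
      rw [List.flatMap_append, List.flatMap_cons]
      have e1 : (vs.filter (fun v => decide (v ≤ f x))).flatMap
          (fun v => (l ++ [x]).filter (fun y => decide (f y = v))) =
          (vs.filter (fun v => decide (v ≤ f x))).flatMap B := by
        apply flatMap_congr_mem
        intro v hv
        have hne : v ≠ f x := fun h => hfx (h ▸ (List.mem_filter.mp hv).1)
        rw [hB', if_neg (by simp [Ne.symm hne])]
        simp
      have e2 : (vs.filter (fun v => decide (f x < v))).flatMap
          (fun v => (l ++ [x]).filter (fun y => decide (f y = v))) =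
          (vs.filter (fun v => decide (f x < v))).flatMap B := by
        apply flatMap_congr_mem
        intro v hv
        have : f x < v := by simpa using (List.mem_filter.mp hv).2
        rw [hB', if_neg (by simp [this.ne])]
        simp
      have e3 : (l ++ [x]).filter (fun y => decide (f y = f x)) = [x] := by
        rw [List.filter_append]
        rw [List.filter_eq_nil_iff.mpr (fun y hy => by
          simp only [decide_eq_true_eq]
          exact fun h => hm (h ▸ List.mem_map_of_mem hy))]
        simp
      rw [e1, e2, e3]
      simp

theorem insertBy_map {α β κ : Type} [LinearOrder κ] (f : β → κ) (g : α → β) (x : α) :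
    ∀ (l : List α),
      (PySem.List.insertBy (fun a b => decide (f (g a) < f (g b))) x l).map g =
        PySem.List.insertBy (fun a b => decide (f a < f b)) (g x) (l.map g) := by
  intro l
  induction l with
  | nil => rfl
  | cons y t ih =>
    by_cases h : decide (f (g x) < f (g y)) = true
    · simp [PySem.List.insertBy, h]
    · simp only [PySem.List.insertBy, h, Bool.false_eq_true, if_false, List.map_cons]
      rw [ih]

theorem map_sorted {α β κ : Type} [LinearOrder κ] (f : β → κ) (g : α → β) :
    ∀ (l : List α), (PySem.List.sorted l (fun x => f (g x))).map g = PySem.List.sorted (l.map g) f := by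
  intro l
  induction l using List.reverseRecOn with
  | nil => rfl
  | append_singleton t x ih =>
    rw [PySem.List.sorted_eq_foldl_insertBy, List.foldl_append, List.foldl_cons, List.foldl_nil,
      ← PySem.List.sorted_eq_foldl_insertBy, insertBy_map, ih, List.map_append, List.map_cons,
      List.map_nil]
    rw [PySem.List.sorted_eq_foldl_insertBy (List.map g t ++ [g x]), List.foldl_append,
      List.foldl_cons, List.foldl_nil, ← PySem.List.sorted_eq_foldl_insertBy]

theorem dedup_append {α : Type} [BEq α] [LawfulBEq α] (xs ys : List α) :
    PySem.List.dedup (xs ++ ys) =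
      PySem.List.dedup xs ++ (PySem.List.dedup ys).filter (fun y => !(PySem.Set.contains xs y)) := by
  simp only [PySem.List.dedup_eq_ofList, PySem.Set.ofList_append, PySem.Set.update_eq_append_filter]
  congr 1
  apply List.filter_congr
  intro y hy
  congr 1
  rw [PySem.Set.contains_eq_listContains, PySem.Set.contains_eq_listContains]
  simp [PySem.Set.mem_ofList]

theorem dedup_map_dedup {α β : Type} [BEq α] [LawfulBEq α] [BEq β] [LawfulBEq β] (f : α → β) :
    ∀ (l : List α), PySem.List.dedup ((PySem.List.dedup l).map f) = PySem.List.dedup (l.map f) := by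
  intro l
  induction l using List.reverseRecOn with
  | nil => rfl
  | append_singleton t x ih =>
    simp only [PySem.List.dedup_eq_ofList, PySem.Set.ofList_append_singleton, List.map_append,
      List.map_cons, List.map_nil] at *
    by_cases hx : x ∈ t
    · have h1 : (PySem.Set.ofList t).add x = PySem.Set.ofList t :=
        PySem.Set.add_of_mem (by rw [PySem.Set.mem_ofList]; exact hx)
      have h2 : (PySem.Set.ofList (List.map f t)).add (f x) = PySem.Set.ofList (List.map f t) :=
        PySem.Set.add_of_mem (by rw [PySem.Set.mem_ofList]; exact List.mem_map.mpr ⟨x, hx, rfl⟩)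
      rw [h1, h2, ih]
    · have h1 : (PySem.Set.ofList t).add x = PySem.Set.ofList t ++ [x] :=
        PySem.Set.add_of_not_mem (by rw [PySem.Set.mem_ofList]; exact hx)
      rw [h1, List.map_append, List.map_cons, List.map_nil, PySem.Set.ofList_append_singleton, ih]

theorem dedup_filter {α : Type} [BEq α] [LawfulBEq α] (p : α → Bool) :
    ∀ (l : List α), PySem.List.dedup (l.filter p) = (PySem.List.dedup l).filter p := by
  intro l
  induction l using List.reverseRecOn with
  | nil => rfl
  | append_singleton t x ih =>
    simp only [PySem.List.dedup_eq_ofList] at *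
    rw [List.filter_append]
    by_cases hp : p x = true
    · rw [List.filter_cons_of_pos hp, List.filter_nil,
        PySem.Set.ofList_append_singleton, PySem.Set.ofList_append_singleton]
      by_cases hx : x ∈ t
      · have h1 : (PySem.Set.ofList t).add x = PySem.Set.ofList t :=
          PySem.Set.add_of_mem (by rw [PySem.Set.mem_ofList]; exact hx)
        have h2 : (PySem.Set.ofList (List.filter p t)).add x = PySem.Set.ofList (List.filter p t) :=
          PySem.Set.add_of_mem (by rw [PySem.Set.mem_ofList]; exact List.mem_filter.mpr ⟨hx, hp⟩)
        rw [h1, h2, ih]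
      · have h1 : (PySem.Set.ofList t).add x = PySem.Set.ofList t ++ [x] :=
          PySem.Set.add_of_not_mem (by rw [PySem.Set.mem_ofList]; exact hx)
        have h2 : (PySem.Set.ofList (List.filter p t)).add x = PySem.Set.ofList (List.filter p t) ++ [x] :=
          PySem.Set.add_of_not_mem (by rw [PySem.Set.mem_ofList]; exact fun hm => hx (List.mem_filter.mp hm).1)
        rw [h1, h2, ih, List.filter_append, List.filter_cons_of_pos hp, List.filter_nil]
    · rw [List.filter_cons_of_neg (by simp [hp]), List.filter_nil, List.append_nil,
        PySem.Set.ofList_append_singleton, PySem.Set.add_eq_ite]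
      split
      · exact ih
      · rw [List.filter_append, List.filter_cons_of_neg (by simp [hp]), List.filter_nil,
          List.append_nil, ih]

theorem dedup_flatMap_blocks {α κ : Type} [BEq α] [LawfulBEq α] [LinearOrder κ]
    (f : α → κ) (l : List α) :
    ∀ (vs : List κ), vs.Nodup →
      PySem.List.dedup (vs.flatMap (fun v => l.filter (fun x => decide (f x = v)))) =
        vs.flatMap (fun v => PySem.List.dedup (l.filter (fun x => decide (f x = v)))) := by
  intro vs
  induction vs with
  | nil => intro _; rfl
  | cons v t ih =>
    intro hnd
    rcases List.nodup_cons.mp hnd with ⟨hv, ht⟩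
    rw [List.flatMap_cons, dedup_append, ih ht, List.flatMap_cons]
    congr 1
    rw [List.filter_eq_self.mpr]
    intro y hy
    rcases List.mem_flatMap.mp hy with ⟨w, hw, hyw⟩
    have hfy : f y = w := of_decide_eq_true (List.mem_filter.mp ((PySem.List.mem_dedup _ _).mp hyw)).2
    rw [PySem.Set.contains_eq_listContains]
    simp only [Bool.not_eq_eq_eq_not, List.contains_eq_any_beq]
    rw [show (!true) = false from rfl]
    simp only [List.any_eq_false]
    intro z hz
    have hfz : f z = v := of_decide_eq_true (List.mem_filter.mp hz).2
    intro hbeq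
    have : y = z := by simpa using hbeq
    subst this
    exact hv (by rw [← hfy, hfz] at hw; exact hw)

theorem find?_filter_of_imp {α : Type} (p q : α → Bool) (h : ∀ b, p b = true → q b = true) :
    ∀ (l : List α), (l.filter q).find? p = l.find? p := by
  intro l
  induction l with
  | nil => rfl
  | cons b t ih =>
    by_cases hq : q b = true
    · rw [List.filter_cons_of_pos hq]
      cases hp : p b with
      | true => simp [hp]
      | false => simp [hp, ih]
    · rw [List.filter_cons_of_neg (by simp [hq])]
      have hp : p b = false := by
        cases hpb : p b with
        | false => rfl
        | true => exact absurd (h b hpb) (by simp [hq])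
      simp [hp, ih]

theorem dedup_sorted {α κ : Type} [LinearOrder κ] [BEq α] [LawfulBEq α] [BEq κ] [LawfulBEq κ]
    (f : α → κ) (l : List α) :
    PySem.List.dedup (PySem.List.sorted l f) = PySem.List.sorted (PySem.List.dedup l) f := by
  have hnd : (PySem.List.sorted (PySem.Set.ofList (l.map f)) (fun v => v)).Nodup :=
    ((PySem.List.sorted_perm _ _ _).nodup_iff).mpr (PySem.Set.nodup_ofList _)
  rw [sorted_blocks f l, dedup_flatMap_blocks f l _ hnd, sorted_blocks f (PySem.List.dedup l)]
  have hws : PySem.Set.ofList ((PySem.List.dedup l).map f) = PySem.Set.ofList (l.map f) := by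
    have := dedup_map_dedup f l
    simpa [PySem.List.dedup_eq_ofList] using this
  rw [hws]
  apply flatMap_congr_mem
  intro v _
  exact dedup_filter _ l

theorem find?_sorted {α κ : Type} [LinearOrder κ] [BEq κ] [LawfulBEq κ] (f : α → κ) (p : α → Bool)
    (v0 : κ) (hp : ∀ b, p b = true → f b = v0) (l : List α) :
    (PySem.List.sorted l f).find? p = l.find? p := by
  rw [sorted_blocks f l]
  have hblock_ne : ∀ v, v ≠ v0 → (l.filter (fun x => decide (f x = v))).find? p = none := by
    intro v hv
    apply List.find?_eq_none.mpr
    intro b hb hpb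
    exact hv ((of_decide_eq_true (List.mem_filter.mp hb).2).symm.trans (hp b hpb) |>.symm ▸ rfl)
  have main : ∀ (vs : List κ),
      (vs.flatMap (fun v => l.filter (fun x => decide (f x = v)))).find? p =
        if v0 ∈ vs then l.find? p else none := by
    intro vs
    induction vs with
    | nil => simp
    | cons v t ih =>
      rw [List.flatMap_cons, List.find?_append, ih]
      by_cases hv : v = v0
      · subst hv
        rw [find?_filter_of_imp p _ (fun b hb => decide_eq_true (hp b hb)) l]
        cases hfl : l.find? p with
        | some b => simp
        | none => simp
      · rw [hblock_ne v hv, Option.none_or]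
        have : (v0 ∈ v :: t) ↔ (v0 ∈ t) := by simp [Ne.symm hv]
        rw [if_congr this rfl rfl]
  rw [main]
  by_cases hm : v0 ∈ PySem.List.sorted (PySem.Set.ofList (l.map f)) (fun v => v)
  · rw [if_pos hm]
  · rw [if_neg hm]
    symm
    apply List.find?_eq_none.mpr
    intro b hb hpb
    exact hm (by
      rw [PySem.List.mem_sorted, PySem.Set.mem_ofList]
      exact (hp b hpb) ▸ List.mem_map_of_mem hb)


theorem replace_go_id (new : List Char) :
    ∀ (fuel : Nat) (l acc : List Char), ('_' ∉ l) →
      PySem.Chars.replace.go ['_'] new fuel l acc = acc.reverse ++ l := by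
  intro fuel
  induction fuel with
  | zero => intro l acc _; rfl
  | succ n ih =>
    intro l acc hl
    cases l with
    | nil => simp [PySem.Chars.replace.go]
    | cons c t =>
      have hc : ('_' == c) = false := by
        simp only [beq_eq_false_iff_ne, ne_eq]
        intro h; exact hl (by simp [← h])
      have hpre : List.isPrefixOf ['_'] (c :: t) = false := by
        simp [List.isPrefixOf, hc]
      rw [PySem.Chars.replace.go]
      simp only [hpre, Bool.false_eq_true, if_false]
      rw [ih t (c :: acc) (fun h => hl (by simp [h]))]
      simp

theorem replace_id_of_not_isIn (k : String) (h : PySem.Str.isIn "_" k = false) :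
    PySem.Str.replace k "_" ":" = k := by
  have hmem : '_' ∉ k.toList := by
    intro hm
    have : PySem.Str.isIn "_" k = true := by
      rw [PySem.Str.isIn_iff_infix]
      rcases List.mem_iff_append.mp hm with ⟨pre, suf, he⟩
      exact ⟨pre, suf, by rw [he]; simp⟩
    rw [this] at h; exact absurd h (by simp)
  rw [PySem.Str.replace]
  have : PySem.Chars.replace k.toList "_".toList ":".toList = k.toList := by
    have h1 : ("_" : String).toList = ['_'] := rfl
    rw [h1, PySem.Chars.replace]
    simp only [List.isEmpty_cons, Bool.false_eq_true, if_false]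
    rw [replace_go_id _ _ _ _ hmem]
    rfl
  rw [this, String.ofList_toList]

theorem update_nil_eq_ofList (xs : List String) :
    PySem.Set.update ([] : PySem.Set String) xs = PySem.Set.ofList xs := rfl

theorem peel_eq : ∀ (l : List (List String)) (out : String),
    pvPeel l out = out ++ PySem.Str.join ""
      ((PySem.List.dedup (l.map (fun b => PySem.List.pyGetD b 2 ""))).map (fun k =>
        pyCenter (PySem.List.pyGetD ((l.find? (fun b => PySem.List.pyGetD b 2 "" == k)).getD []) 1 "") 40 ++
        pyCenter (PySem.Str.replace k "_" ":") 10 ++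
        pyRight (PySem.Int.toStr (((l.map (fun b => PySem.List.pyGetD b 2 "")).count k : Nat) : Int)) 10 ++ "\n")) := by
  intro l out
  induction l, out using pvPeel.induct with
  | case1 out => simp [pvPeel, PySem.Str.join, PySem.Chars.join_nil]
  | case2 b t out key run rest ih =>
    have hkey : key = PySem.List.pyGetD b 2 "" := rfl
    have hrunc : run = b :: t.filter (fun r => PySem.List.pyGetD r 2 "" == key) := by
      rw [show run = (b :: t).filter (fun r => PySem.List.pyGetD r 2 "" == key) from rfl,
        List.filter_cons_of_pos (by rw [hkey]; exact BEq.rfl)]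
    have hrun0 : PySem.List.pyGetD run 0 [] = b := by
      rw [hrunc]; simp [PySem.List.pyGetD_ofNat']
    have hfind0 : (b :: t).find? (fun r => PySem.List.pyGetD r 2 "" == key) = some b :=
      List.find?_cons_of_pos (by rw [hkey]; exact BEq.rfl)
    have hlen : PySem.List.len run =
        (((b :: t).map (fun r => PySem.List.pyGetD r 2 "")).count key : Nat) := by
      rw [hkey] at hrunc ⊢
      rw [show PySem.List.len run = (run.length : Int) from rfl]
      rw [show run = (b :: t).filter (fun r => PySem.List.pyGetD r 2 "" == PySem.List.pyGetD b 2 "") from rfl]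
      rw [← List.countP_eq_length_filter]
      rw [List.count_eq_countP, List.countP_map]
      rfl
    have hrestmap : rest.map (fun r => PySem.List.pyGetD r 2 "") =
        ((b :: t).map (fun r => PySem.List.pyGetD r 2 "")).filter (fun s => !(s == key)) := by
      rw [show rest = (b :: t).filter (fun r => !(PySem.List.pyGetD r 2 "" == key)) from rfl]
      rw [List.filter_map]
      rfl
    have hded : PySem.List.dedup ((b :: t).map (fun r => PySem.List.pyGetD r 2 "")) =
        key :: PySem.List.dedup (rest.map (fun r => PySem.List.pyGetD r 2 "")) := by
      rw [hrestmap, dedup_filter]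
      rw [show (b :: t).map (fun r => PySem.List.pyGetD r 2 "") =
        key :: t.map (fun r => PySem.List.pyGetD r 2 "") from by rw [hkey]; rfl]
      rw [show PySem.List.dedup (key :: t.map (fun r => PySem.List.pyGetD r 2 "")) =
        key :: PySem.Set.discard (PySem.Set.ofList (t.map (fun r => PySem.List.pyGetD r 2 ""))) key from
        PySem.Set.ofList_cons _ _]
      congr 1
      rw [List.filter_cons_of_neg (by simp)]
      rw [show PySem.Set.discard (PySem.Set.ofList (t.map (fun r => PySem.List.pyGetD r 2 ""))) key =
        (PySem.Set.ofList (t.map (fun r => PySem.List.pyGetD r 2 ""))).filter (fun y => !(y == key)) from rfl]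
      rw [List.filter_filter]
      apply List.filter_congr
      intro x _
      cases h : x == key <;> simp
    rw [pvPeel]
    rw [ih]
    rw [hded, List.map_cons, join_empty_cons]
    have hname : PySem.List.pyGetD
        (((b :: t).find? (fun r => PySem.List.pyGetD r 2 "" == key)).getD []) 1 "" =
        PySem.List.pyGetD (PySem.List.pyGetD run 0 []) 1 "" := by
      rw [hfind0, hrun0]
      rfl
    have hmapcongr : (PySem.List.dedup (rest.map (fun r => PySem.List.pyGetD r 2 ""))).map
        (fun k =>
          pyCenter (PySem.List.pyGetD ((rest.find? (fun r => PySem.List.pyGetD r 2 "" == k)).getD []) 1 "") 40 ++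
          pyCenter (PySem.Str.replace k "_" ":") 10 ++
          pyRight (PySem.Int.toStr (((rest.map (fun r => PySem.List.pyGetD r 2 "")).count k : Nat) : Int)) 10 ++ "
") =
        (PySem.List.dedup (rest.map (fun r => PySem.List.pyGetD r 2 ""))).map
        (fun k =>
          pyCenter (PySem.List.pyGetD (((b :: t).find? (fun r => PySem.List.pyGetD r 2 "" == k)).getD []) 1 "") 40 ++
          pyCenter (PySem.Str.replace k "_" ":") 10 ++
          pyRight (PySem.Int.toStr ((((b :: t).map (fun r => PySem.List.pyGetD r 2 "")).count k : Nat) : Int)) 10 ++ "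
") := by
      apply List.map_congr_left
      intro k hk
      have hkne : (k == key) = false := by
        have : k ∈ rest.map (fun r => PySem.List.pyGetD r 2 "") := (PySem.List.mem_dedup _ _).mp hk
        rw [hrestmap] at this
        exact Bool.not_eq_true' .. |>.mp (by simpa using (List.mem_filter.mp this).2)
      have hfind : rest.find? (fun r => PySem.List.pyGetD r 2 "" == k) =
          (b :: t).find? (fun r => PySem.List.pyGetD r 2 "" == k) := by
        rw [show rest = (b :: t).filter (fun r => !(PySem.List.pyGetD r 2 "" == key)) from rfl]
        apply find?_filter_of_imp
        intro r hr
        have : PySem.List.pyGetD r 2 "" = k := by simpa using hr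
        simp [this, hkne]
      have hcount : (rest.map (fun r => PySem.List.pyGetD r 2 "")).count k =
          ((b :: t).map (fun r => PySem.List.pyGetD r 2 "")).count k := by
        rw [hrestmap, List.count_filter (by simp [hkne])]
      rw [hfind, hcount]
    rw [hmapcongr, hname, hlen]
    rw [String.append_assoc]

-- ===== VERDICT (by name: the statement is the Claim_ definition above) =====
theorem mapIDToAmountString_spec : Claim_equal_mapIDToAmountString := by
  intro m dic0 _ _
  unfold Spec_mapIDToAmountString mapIDToAmountString mapIDToAmountString_alt
  simp only [loopA_eq]
  have hblocks : m.flatMap (fun row => row.map (fun c => ((pvDictOf dic0).get? c).getD []))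
      = (m.flatMap (fun r => r)).map (pvBlockOf (pvDictOf dic0)) := by
    rw [List.map_flatMap]
    rfl
  rw [hblocks]
  rw [foldA_keys, PySem.Dict.keys_empty, update_nil_eq_ofList]
  rw [strfold]
  rw [peel_eq]
  -- the sorted record list projected to keys is the stable sort of the key list
  have hmap : (PySem.List.sorted ((m.flatMap (fun r => r)).map (pvBlockOf (pvDictOf dic0)))
        (fun b => pvSkey (PySem.List.pyGetD b 2 ""))).map (fun b => PySem.List.pyGetD b 2 "")
      = PySem.List.sorted ((m.flatMap (fun r => r)).map (pvKeyOf (pvDictOf dic0))) pvSkey := by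
    rw [map_sorted pvSkey (fun b => PySem.List.pyGetD b 2 ""), List.map_map]
    rfl
  have hded : PySem.List.dedup ((PySem.List.sorted
        ((m.flatMap (fun r => r)).map (pvBlockOf (pvDictOf dic0)))
        (fun b => pvSkey (PySem.List.pyGetD b 2 ""))).map (fun b => PySem.List.pyGetD b 2 ""))
      = PySem.List.sorted (PySem.Set.ofList ((m.flatMap (fun r => r)).map (pvKeyOf (pvDictOf dic0)))) pvSkey := by
    rw [hmap, dedup_sorted, PySem.List.dedup_eq_ofList]
  rw [hded]
  have hcongr : ∀ k ∈ PySem.List.sorted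
      (PySem.Set.ofList ((m.flatMap (fun r => r)).map (pvKeyOf (pvDictOf dic0)))) pvSkey,
      (pyCenter (PySem.List.pyGetD (((PySem.List.sorted
          ((m.flatMap (fun r => r)).map (pvBlockOf (pvDictOf dic0)))
          (fun b => pvSkey (PySem.List.pyGetD b 2 ""))).find?
            (fun b => PySem.List.pyGetD b 2 "" == k)).getD []) 1 "") 40 ++
        pyCenter (PySem.Str.replace k "_" ":") 10 ++
        pyRight (PySem.Int.toStr ((((PySem.List.sorted
          ((m.flatMap (fun r => r)).map (pvBlockOf (pvDictOf dic0)))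
          (fun b => pvSkey (PySem.List.pyGetD b 2 ""))).map (fun b => PySem.List.pyGetD b 2 "")).count k : Nat) : Int)) 10 ++ "
")
      = (pyCenter (((m.flatMap (fun r => r)).foldl (pvStepA (pvDictOf dic0)) PySem.Dict.empty).getD k (0, "")).2 40 ++
        pyCenter (if PySem.Str.isIn "_" k then PySem.Str.replace k "_" ":" else k) 10 ++
        pyRight (PySem.Int.toStr (((m.flatMap (fun r => r)).foldl (pvStepA (pvDictOf dic0)) PySem.Dict.empty).getD k (0, "")).1) 10 ++ "
") := by
    intro k hk
    have hkmem : k ∈ (m.flatMap (fun r => r)).map (pvKeyOf (pvDictOf dic0)) := by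
      rw [PySem.List.mem_sorted, PySem.Set.mem_ofList] at hk
      exact hk
    -- A side value
    rw [foldA_getD, PySem.Dict.contains_empty]
    simp only [Bool.false_eq_true, if_false]
    -- first record with this key = first cell with this key
    have hfind : (PySem.List.sorted ((m.flatMap (fun r => r)).map (pvBlockOf (pvDictOf dic0)))
        (fun b => pvSkey (PySem.List.pyGetD b 2 ""))).find? (fun b => PySem.List.pyGetD b 2 "" == k)
        = ((m.flatMap (fun r => r)).find? (fun c => pvKeyOf (pvDictOf dic0) c == k)).map
            (pvBlockOf (pvDictOf dic0)) := by
      rw [find?_sorted (fun b => pvSkey (PySem.List.pyGetD b 2 ""))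
        (fun b => PySem.List.pyGetD b 2 "" == k) (pvSkey k)
        (fun b hb => by
          have hbk : PySem.List.pyGetD b 2 "" = k := eq_of_beq hb
          show pvSkey (PySem.List.pyGetD b 2 "") = pvSkey k
          rw [hbk]) _]
      rw [List.find?_map]
      rfl
    have hcount : ((PySem.List.sorted ((m.flatMap (fun r => r)).map (pvBlockOf (pvDictOf dic0)))
        (fun b => pvSkey (PySem.List.pyGetD b 2 ""))).map (fun b => PySem.List.pyGetD b 2 "")).count k
        = ((m.flatMap (fun r => r)).map (pvKeyOf (pvDictOf dic0))).count k := by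
      rw [hmap]
      exact (PySem.List.sorted_perm _ _ _).count_eq k
    rw [hfind, hcount]
    -- the first cell exists since k occurs among the keys
    obtain ⟨c, hc, hck⟩ := List.mem_map.mp hkmem
    have hsome : ((m.flatMap (fun r => r)).find? (fun c => pvKeyOf (pvDictOf dic0) c == k)).isSome := by
      rw [List.find?_isSome]
      exact ⟨c, hc, by simp [hck]⟩
    obtain ⟨c0, hc0⟩ := Option.isSome_iff_exists.mp hsome
    rw [hc0]
    simp only [pvAgg, hc0, Option.map_some, Option.getD_some]
    -- the blockID: '_'-free keys are unchanged by replace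
    by_cases hin : PySem.Str.isIn "_" k = true
    · rw [if_pos hin]
      rfl
    · rw [if_neg (by simp [Bool.not_eq_true] at hin ⊢; exact hin),
        replace_id_of_not_isIn k (Bool.not_eq_true _ ▸ (by simpa using hin))]
      rfl
  rw [List.map_congr_left hcongr]
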